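-- pv_equiv track=rewrite | github.com/leonimurilo/chicago_bikeshare_us | chicago_bikeshare.py | count_user_type
-- ===== SOURCE A (Python) =====
-- def count_user_type(data_list):
--     subscriber = 0
--     customer = 0
--     for row in data_list:
--         if row['User Type'] == 'Subscriber':
--             subscriber += 1
--         elif row['User Type'] == 'Customer':
--             customer += 1
--     return [subscriber, customer]
-- ===== SOURCE B (Python) =====
-- def count_user_type(data_list):
--     # Two separate counting passes, one per category, instead of one combined loop.
--     return [sum(1 for row in data_list if row['User Type'] == 'Subscriber'),
--             sum(1 for row in data_list if row['User Type'] == 'Customer')]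
-- ===== Notes on version B (the rewrite author's own statement) =====
-- stated objective: idiomatic
-- what changed: Replaced the single accumulator loop with branches by two independent counting passes (one sum-comprehension per user type).
import Mathlib
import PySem

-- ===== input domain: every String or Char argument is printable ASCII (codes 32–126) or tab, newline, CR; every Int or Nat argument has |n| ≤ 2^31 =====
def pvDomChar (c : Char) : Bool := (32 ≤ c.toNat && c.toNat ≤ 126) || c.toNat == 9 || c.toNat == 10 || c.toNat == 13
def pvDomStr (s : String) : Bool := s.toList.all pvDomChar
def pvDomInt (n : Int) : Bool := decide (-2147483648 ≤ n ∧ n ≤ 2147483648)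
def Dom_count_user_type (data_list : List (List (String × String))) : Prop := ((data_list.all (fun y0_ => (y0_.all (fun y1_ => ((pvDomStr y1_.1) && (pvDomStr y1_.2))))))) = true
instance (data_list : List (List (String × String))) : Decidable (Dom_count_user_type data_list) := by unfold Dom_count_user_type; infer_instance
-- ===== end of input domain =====

-- B replaces A's single branch-in-loop accumulation by two independent counting passes, one per user type.
-- Row lookup row['User Type'] is first-match on the association list; it equals getD under Pre_ (key present, so no KeyError).

-- ===== PORT A =====
def count_user_type (data_list : List (List (String × String))) : List Int :=
  let r := data_list.foldl (fun (sc : Int × Int) row =>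
    if (PySem.Dict.mk row).getD "User Type" "" == "Subscriber" then (sc.1 + 1, sc.2)
    else if (PySem.Dict.mk row).getD "User Type" "" == "Customer" then (sc.1, sc.2 + 1)
    else sc) (0, 0)
  [r.1, r.2]

-- ===== PORT B =====
def count_user_type_alt (data_list : List (List (String × String))) : List Int :=
  [((data_list.filter (fun row => (PySem.Dict.mk row).getD "User Type" "" == "Subscriber")).length : Int),
   ((data_list.filter (fun row => (PySem.Dict.mk row).getD "User Type" "" == "Customer")).length : Int)]

-- ===== PRECONDITION & SPEC =====
-- Pre_ excludes rows without a 'User Type' key, on which both A and B raise KeyError.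
def Pre_count_user_type (data_list : List (List (String × String))) : Prop :=
  ∀ row ∈ data_list, (PySem.Dict.mk row).contains "User Type" = true
instance (data_list : List (List (String × String))) : Decidable (Pre_count_user_type data_list) := by unfold Pre_count_user_type; infer_instance
def pvWitness_count_user_type : (List (List (String × String))) :=
  [[("User Type", "Subscriber")], [("User Type", "Customer"), ("id", "3")]]
def Spec_count_user_type (data_list : List (List (String × String))) (out : List Int) : Prop := out = count_user_type_alt data_list
instance (data_list : List (List (String × String))) (out : List Int) : Decidable (Spec_count_user_type data_list out) := by unfold Spec_count_user_type; infer_instance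

-- ===== CLAIM (what is proved, stated in full; the proofs are below) =====
def Claim_equal_count_user_type : Prop := ∀ (data_list : List (List (String × String))), Dom_count_user_type data_list → Pre_count_user_type data_list → Spec_count_user_type data_list (count_user_type data_list)

-- ===== LEMMAS AND PROOFS =====

-- ===== VERDICT (by name: the statement is the Claim_ definition above) =====
lemma cut_foldl (l : List (List (String × String))) (s c : Int) :
    l.foldl (fun (sc : Int × Int) row =>
      if (PySem.Dict.mk row).getD "User Type" "" == "Subscriber" then (sc.1 + 1, sc.2)
      else if (PySem.Dict.mk row).getD "User Type" "" == "Customer" then (sc.1, sc.2 + 1)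
      else sc) (s, c) =
    (s + ((l.filter (fun row => (PySem.Dict.mk row).getD "User Type" "" == "Subscriber")).length : Int),
     c + ((l.filter (fun row => (PySem.Dict.mk row).getD "User Type" "" == "Customer")).length : Int)) := by
  induction l generalizing s c with
  | nil => simp
  | cons h t ih =>
    have hS := Bool.eq_false_or_eq_true ((PySem.Dict.mk h).getD "User Type" "" == "Subscriber")
    have hC := Bool.eq_false_or_eq_true ((PySem.Dict.mk h).getD "User Type" "" == "Customer")
    rcases hS with h1 | h1 <;> rcases hC with h2 | h2 <;>
      [exact absurd (by simpa using h2)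
         (by rw [show (PySem.Dict.mk h).getD "User Type" "" = "Subscriber" from by simpa using h1]
             decide);
       skip; skip; skip] <;>
    simp only [List.foldl_cons, List.filter_cons, h1, h2, if_true, if_false,
      Bool.false_eq_true, ih, List.length_cons, Prod.mk.injEq] <;>
    constructor <;> push_cast <;> ring

theorem count_user_type_spec : Claim_equal_count_user_type := by
  intro l _ _
  unfold Spec_count_user_type count_user_type count_user_type_alt
  rw [cut_foldl]
  simp
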